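-- pv_equiv track=rewrite | github.com/pratikbhatia199/bundler | bundler.py | remove_tokens_after_street
-- ===== SOURCE A (Python) =====
-- def remove_tokens_after_street(line2):
--     tokens = line2.split()
--     last_index = 0
--     for index, token in enumerate(tokens):
--         if token == 'STREET' or token == 'AVENUE':
--             last_index = index
--     tokens = tokens[0:last_index+1]
--     return ' '.join(tokens)
-- ===== SOURCE B (Python) =====
-- def remove_tokens_after_street(line2):
--     tokens = line2.split()
--     kept = list(tokens)
--     while kept and kept[-1] not in ('STREET', 'AVENUE'):
--         kept.pop()
--     return ' '.join(kept if kept else tokens[:1])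
-- ===== Notes on version B (the rewrite author's own statement) =====
-- stated objective: alternative
-- what changed: Instead of a forward scan tracking the last matching index and slicing, B trims the token list from the right, popping trailing tokens until the last one is STREET/AVENUE (falling back to the first token when none remains), so it never computes indices at all.
import Mathlib
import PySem

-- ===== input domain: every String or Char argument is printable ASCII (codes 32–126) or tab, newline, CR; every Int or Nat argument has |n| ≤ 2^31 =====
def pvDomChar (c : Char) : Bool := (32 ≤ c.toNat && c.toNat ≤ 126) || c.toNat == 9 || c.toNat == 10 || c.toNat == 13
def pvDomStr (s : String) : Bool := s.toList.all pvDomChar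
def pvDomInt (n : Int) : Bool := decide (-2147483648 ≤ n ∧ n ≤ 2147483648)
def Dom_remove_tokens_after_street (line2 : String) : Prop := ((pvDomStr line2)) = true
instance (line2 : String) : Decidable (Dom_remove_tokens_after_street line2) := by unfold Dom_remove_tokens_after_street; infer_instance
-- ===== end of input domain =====

-- B trims trailing non-STREET/AVENUE tokens from the right (pop loop) instead of A's forward last-index scan and slice; alternative decomposition, same cost.


-- ===== PORT A =====
def remove_tokens_after_street (line2 : String) : String :=
  let tokens := PySem.Str.split₀ line2
  let last_index : Int := (PySem.List.enumerate tokens).foldl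
    (fun acc p => if p.2 == "STREET" || p.2 == "AVENUE" then p.1 else acc) 0
  PySem.Str.join " " (PySem.List.slice tokens (some 0) (some (last_index + 1)))

-- ===== PORT B =====
-- the Python loop: while kept and kept[-1] not in ('STREET','AVENUE'): kept.pop()
def pvPopLoop (ks : List String) : List String :=
  if hne : ks = [] then ks
  else
    let t := ks.getLast hne
    if t == "STREET" || t == "AVENUE" then ks else pvPopLoop ks.dropLast
termination_by ks.length
decreasing_by
  have hpos := List.length_pos_of_ne_nil hne
  simp only [List.length_dropLast]
  omega

def remove_tokens_after_street_alt (line2 : String) : String :=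
  let tokens := PySem.Str.split₀ line2
  let kept := pvPopLoop tokens
  PySem.Str.join " " (if kept.isEmpty then PySem.List.slice tokens none (some 1) else kept)

-- ===== PRECONDITION & SPEC =====
def Spec_remove_tokens_after_street (line2 : String) (out : String) : Prop := out = remove_tokens_after_street_alt line2
instance (line2 : String) (out : String) : Decidable (Spec_remove_tokens_after_street line2 out) := by unfold Spec_remove_tokens_after_street; infer_instance

-- ===== CLAIM (what is proved, stated in full; the proofs are below) =====
def Claim_equal_remove_tokens_after_street : Prop := ∀ (line2 : String), Dom_remove_tokens_after_street line2 → Spec_remove_tokens_after_street line2 (remove_tokens_after_street line2)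

-- ===== LEMMAS AND PROOFS =====

theorem pvPopLoop_nil : pvPopLoop [] = [] := by
  rw [pvPopLoop]; simp

theorem pvPopLoop_append_singleton (ts : List String) (t : String) :
    pvPopLoop (ts ++ [t]) = if t == "STREET" || t == "AVENUE" then ts ++ [t] else pvPopLoop ts := by
  rw [pvPopLoop]
  have hne : ts ++ [t] ≠ [] := by simp
  rw [dif_neg hne]
  simp

-- A-side: the fold's result is the start accumulator or one of the enumerated indices.
theorem pv_fold_mem (ps : List (Int × String)) (acc : Int) :
    ps.foldl (fun a p => if p.2 == "STREET" || p.2 == "AVENUE" then p.1 else a) acc = acc ∨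
    ps.foldl (fun a p => if p.2 == "STREET" || p.2 == "AVENUE" then p.1 else a) acc ∈ ps.map Prod.fst := by
  induction ps generalizing acc with
  | nil => exact Or.inl rfl
  | cons p ps ih =>
    rw [List.foldl_cons]
    rcases ih (if p.2 == "STREET" || p.2 == "AVENUE" then p.1 else acc) with h | h
    · by_cases hc : (p.2 == "STREET" || p.2 == "AVENUE") = true
      · refine Or.inr ?_
        rw [h, if_pos hc, List.map_cons]
        exact List.mem_cons_self ..
      · exact Or.inl (by rw [h, if_neg hc])
    · refine Or.inr ?_
      rw [List.map_cons]
      exact List.mem_cons_of_mem _ h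

theorem pv_enumerate_append_singleton (ts : List String) (t : String) (s : Int) :
    PySem.List.enumerate (ts ++ [t]) s = PySem.List.enumerate ts s ++ [(s + ts.length, t)] := by
  induction ts generalizing s with
  | nil => simp [PySem.List.enumerate_cons, PySem.List.enumerate_nil]
  | cons a l ih =>
    have hc : s + 1 + (l.length : Int) = s + ((l.length : Int) + 1) := by ring
    simp [PySem.List.enumerate_cons, ih, hc]

-- abbreviation for A's fold over the enumeration starting at 0
def pvFoldA (ts : List String) : Int :=
  (PySem.List.enumerate ts).foldl (fun a p => if p.2 == "STREET" || p.2 == "AVENUE" then p.1 else a) 0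

theorem pvFoldA_nonneg (ts : List String) : 0 ≤ pvFoldA ts := by
  unfold pvFoldA
  rcases pv_fold_mem (PySem.List.enumerate ts) 0 with h | h
  · rw [h]
  · rw [PySem.List.map_fst_enumerate, PySem.List.mem_pyRange_one] at h
    exact h.1

theorem pvFoldA_lt_length (ts : List String) (hne : ts ≠ []) : pvFoldA ts < ts.length := by
  unfold pvFoldA
  rcases pv_fold_mem (PySem.List.enumerate ts) 0 with h | h
  · rw [h]
    have := List.length_pos_of_ne_nil hne
    omega
  · rw [PySem.List.map_fst_enumerate, PySem.List.mem_pyRange_one] at h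
    have := h.2
    omega

theorem pvFoldA_append_singleton (ts : List String) (t : String) :
    pvFoldA (ts ++ [t]) = if t == "STREET" || t == "AVENUE" then (ts.length : Int) else pvFoldA ts := by
  unfold pvFoldA
  rw [pv_enumerate_append_singleton, List.foldl_append]
  simp

-- the core equivalence on the token list
theorem pv_core (ts : List String) :
    PySem.List.slice ts (some 0) (some (pvFoldA ts + 1)) =
      (if (pvPopLoop ts).isEmpty then PySem.List.slice ts none (some 1) else pvPopLoop ts) := by
  induction ts using List.reverseRecOn with
  | nil => simp [pvPopLoop_nil, PySem.List.slice]
  | append_singleton ts t ih =>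
    rw [pvFoldA_append_singleton, pvPopLoop_append_singleton]
    by_cases hp : (t == "STREET" || t == "AVENUE") = true
    · rw [if_pos hp, if_pos hp]
      have hne : (ts ++ [t]).isEmpty = false := by simp
      rw [hne]
      simp only [Bool.false_eq_true, if_false, PySem.List.slice_zero_start]
      have hcast : ((ts.length : Int) + 1) = ((ts.length + 1 : Nat) : Int) := by push_cast; ring
      rw [hcast, PySem.List.slice_to_natCast]
      simp
    · rw [if_neg hp, if_neg hp]
      cases ts with
      | nil =>
        simp only [List.nil_append, pvPopLoop_nil]
        have h0 : pvFoldA ([] : List String) = 0 := by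
          simp [pvFoldA, PySem.List.enumerate_nil]
        rw [h0]
        simp [PySem.List.slice_zero_start]
      | cons a l =>
        have h0 := pvFoldA_nonneg (a :: l)
        have hlt := pvFoldA_lt_length (a :: l) (by simp)
        have hcast : pvFoldA (a :: l) + 1 = (((pvFoldA (a :: l)).toNat + 1 : Nat) : Int) := by omega
        have hle : (pvFoldA (a :: l)).toNat + 1 ≤ (a :: l).length := by
          simp only [List.length_cons] at hlt ⊢
          omega
        rw [hcast] at ih ⊢
        rw [PySem.List.slice_zero_start] at ih ⊢
        rw [PySem.List.slice_to_natCast] at ih ⊢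
        rw [List.take_append_of_le_length hle]
        have hone : (1 : Int) = ((1 : Nat) : Int) := rfl
        have h1 : PySem.List.slice ((a :: l) ++ [t]) none (some 1) =
            PySem.List.slice (a :: l) none (some 1) := by
          rw [hone, PySem.List.slice_to_natCast, PySem.List.slice_to_natCast]
          exact List.take_append_of_le_length (by simp)
        rw [h1]
        exact ih

-- ===== VERDICT (by name: the statement is the Claim_ definition above) =====
theorem remove_tokens_after_street_spec : Claim_equal_remove_tokens_after_street := by
  intro line2 _
  unfold Spec_remove_tokens_after_street remove_tokens_after_street remove_tokens_after_street_alt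
  simp only
  exact congrArg (PySem.Str.join " ") (pv_core (PySem.Str.split₀ line2))
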